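-- pv_equiv track=rewrite | github.com/nyjc-computing-2425/assignment-7b-majesticmist | main.py | analyze_grades
-- ===== SOURCE A (Python) =====
-- def analyze_grades(studentdata):
--   analysis = {} #matrix
--   for student in studentdata:
--     class_ = student['class']
--     grade = student['grade']
--
--     if class_ not in analysis:
--       analysis[class_] = {}
--       analysis[class_]['A'] = 0
--       analysis[class_]['B'] = 0
--       analysis[class_]['C'] = 0
--       analysis[class_]['D'] = 0
--       analysis[class_]['E'] = 0
--       analysis[class_]['S'] = 0
--       analysis[class_]['U'] = 0
--
--     if grade in analysis[class_]:
--       analysis[class_][grade] += 1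
--
--   return analysis
-- ===== SOURCE B (Python) =====
-- GRADES = ('A', 'B', 'C', 'D', 'E', 'S', 'U')
--
-- def analyze_grades(studentdata):
--     pairs = [(s['class'], s['grade']) for s in studentdata]
--     order = list(dict.fromkeys(c for c, _ in pairs))
--     counts = {}
--     for key in pairs:
--         counts[key] = counts.get(key, 0) + 1
--     return {c: {g: counts.get((c, g), 0) for g in GRADES} for c in order}
-- ===== Notes on version B (the rewrite author's own statement) =====
-- stated objective: alternative
-- what changed: Replaces A's incremental nested-dict mutation (init-template-on-first-sight, then conditional in-place increment) by a flat (class,grade) counter built in one pass plus a first-appearance class order list, from which the nested result is assembled at the end reading only the 7 valid grade keys.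
import Mathlib
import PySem

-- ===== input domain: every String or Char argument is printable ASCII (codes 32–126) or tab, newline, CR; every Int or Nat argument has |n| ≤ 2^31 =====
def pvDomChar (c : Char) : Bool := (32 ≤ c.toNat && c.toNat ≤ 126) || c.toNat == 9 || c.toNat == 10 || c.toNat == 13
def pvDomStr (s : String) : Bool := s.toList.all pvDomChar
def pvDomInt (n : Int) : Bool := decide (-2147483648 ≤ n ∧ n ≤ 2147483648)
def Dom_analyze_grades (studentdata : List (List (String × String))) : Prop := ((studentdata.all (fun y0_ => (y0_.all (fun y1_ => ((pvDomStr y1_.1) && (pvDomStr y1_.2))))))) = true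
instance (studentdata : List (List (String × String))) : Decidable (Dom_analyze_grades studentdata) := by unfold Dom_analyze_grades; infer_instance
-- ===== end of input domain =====

-- B builds a flat (class,grade) counter and a first-appearance class order list in one
-- sweep, then assembles the nested result at the end; A mutates nested dicts incrementally.
-- Equivalence is about the RETURN value; neither program mutates its argument.

-- student['k'] : exact on Pre_ (key present); Python raises KeyError on a missing key,
-- those inputs are excluded by Pre_analyze_grades.
def pyGetKey (s : List (String × String)) (k : String) : String :=
  ((PySem.Dict.ofList s).get? k).getD ""

-- ===== PORT A =====
def analyze_grades_step (analysis : PySem.Dict String (PySem.Dict String Int))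
    (student : List (String × String)) : PySem.Dict String (PySem.Dict String Int) :=
  let class_ := pyGetKey student "class"
  let grade := pyGetKey student "grade"
  let analysis :=
    if analysis.contains class_ then analysis
    else
      let analysis := analysis.insert class_ PySem.Dict.empty
      let analysis := analysis.insert class_ ((analysis.getD class_ PySem.Dict.empty).insert "A" 0)
      let analysis := analysis.insert class_ ((analysis.getD class_ PySem.Dict.empty).insert "B" 0)
      let analysis := analysis.insert class_ ((analysis.getD class_ PySem.Dict.empty).insert "C" 0)
      let analysis := analysis.insert class_ ((analysis.getD class_ PySem.Dict.empty).insert "D" 0)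
      let analysis := analysis.insert class_ ((analysis.getD class_ PySem.Dict.empty).insert "E" 0)
      let analysis := analysis.insert class_ ((analysis.getD class_ PySem.Dict.empty).insert "S" 0)
      analysis.insert class_ ((analysis.getD class_ PySem.Dict.empty).insert "U" 0)
  if (analysis.getD class_ PySem.Dict.empty).contains grade then
    analysis.insert class_
      ((analysis.getD class_ PySem.Dict.empty).insert grade
        ((analysis.getD class_ PySem.Dict.empty).getD grade 0 + 1))
  else analysis

def analyze_grades (studentdata : List (List (String × String))) : List (String × List (String × Int)) :=
  let analysis := studentdata.foldl analyze_grades_step PySem.Dict.empty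
  analysis.items.map (fun p => (p.1, p.2.items))

-- ===== PORT B =====
def pvGRADES : List String := ["A", "B", "C", "D", "E", "S", "U"]

def analyze_grades_alt (studentdata : List (List (String × String))) : List (String × List (String × Int)) :=
  let pairs := studentdata.map (fun s => (pyGetKey s "class", pyGetKey s "grade"))
  let order := PySem.List.dedup (pairs.map (fun p => p.1))
  let counts := pairs.foldl (fun d key => d.insert key (d.getD key 0 + 1))
    (PySem.Dict.empty : PySem.Dict (String × String) Int)
  order.map (fun c => (c, pvGRADES.map (fun g => (g, counts.getD (c, g) 0))))

-- ===== PRECONDITION & SPEC =====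
-- Pre_ excludes exactly the inputs where A raises KeyError: a student dict missing 'class' or 'grade'.
def Pre_analyze_grades (studentdata : List (List (String × String))) : Prop :=
  ∀ s ∈ studentdata, (PySem.Dict.ofList s).contains "class" = true ∧ (PySem.Dict.ofList s).contains "grade" = true
instance (studentdata : List (List (String × String))) : Decidable (Pre_analyze_grades studentdata) := by
  unfold Pre_analyze_grades; infer_instance

def pvWitness_analyze_grades : (List (List (String × String))) :=
  [[("class", "1A"), ("grade", "A")]]

def Spec_analyze_grades (studentdata : List (List (String × String))) (out : List (String × List (String × Int))) : Prop := out = analyze_grades_alt studentdata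
instance (studentdata : List (List (String × String))) (out : List (String × List (String × Int))) : Decidable (Spec_analyze_grades studentdata out) := by unfold Spec_analyze_grades; infer_instance

-- ===== CLAIM (what is proved, stated in full; the proofs are below) =====
def Claim_equal_analyze_grades : Prop := ∀ (studentdata : List (List (String × String))), Dom_analyze_grades studentdata → Pre_analyze_grades studentdata → Spec_analyze_grades studentdata (analyze_grades studentdata)

-- ===== LEMMAS AND PROOFS =====
def pvInner (pairs : List (String × String)) (c : String) : PySem.Dict String Int :=
  PySem.Dict.mk (pvGRADES.map (fun g => (g, (pairs.count (c, g) : Int))))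

def pvBuild2 (S : List String) (pairs : List (String × String)) :
    List (String × PySem.Dict String Int) :=
  S.map (fun c => (c, pvInner pairs c))

def pvBuild (pairs : List (String × String)) : List (String × PySem.Dict String Int) :=
  pvBuild2 (PySem.Set.ofList (pairs.map Prod.fst)) pairs

theorem pvItems_mk {κ ν : Type} (l : List (κ × ν)) : (PySem.Dict.mk l).items = l := rfl

theorem pvKeys_build2 (S : List String) (pairs : List (String × String)) :
    (PySem.Dict.mk (pvBuild2 S pairs)).keys = S := by
  simp [pvBuild2, PySem.Dict.keys_mk, List.map_map, Function.comp_def]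

theorem pvKeys_inner (pairs : List (String × String)) (c : String) :
    (pvInner pairs c).keys = pvGRADES := by
  simp [pvInner, PySem.Dict.keys_mk, List.map_map, Function.comp_def]

theorem pvGetD_build2 (S : List String) (pairs : List (String × String)) (cl : String)
    (hS : S.Nodup) (hcl : cl ∈ S) :
    (PySem.Dict.mk (pvBuild2 S pairs)).getD cl PySem.Dict.empty = pvInner pairs cl := by
  apply PySem.Dict.getD_of_mem_items
  · exact List.mem_map.2 ⟨cl, hcl, rfl⟩
  · rw [pvKeys_build2]; exact hS

theorem pvContains_inner (pairs : List (String × String)) (c g : String) :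
    (pvInner pairs c).contains g = decide (g ∈ pvGRADES) := by
  by_cases hmem : g ∈ pvGRADES
  · have ht : (pvInner pairs c).contains g = true := by
      rw [PySem.Dict.contains_iff_mem_keys, pvKeys_inner]; exact hmem
    simp [ht, hmem]
  · have hf : (pvInner pairs c).contains g = false := by
      have hnt : ¬ ((pvInner pairs c).contains g = true) := by
        rw [PySem.Dict.contains_iff_mem_keys, pvKeys_inner]; exact hmem
      simp only [Bool.not_eq_true] at hnt
      exact hnt
    simp [hf, hmem]

theorem pvGetD_inner (pairs : List (String × String)) (c g : String) (hg : g ∈ pvGRADES) :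
    (pvInner pairs c).getD g 0 = (pairs.count (c, g) : Int) := by
  apply PySem.Dict.getD_of_mem_items
  · exact List.mem_map.2 ⟨g, hg, rfl⟩
  · rw [pvKeys_inner]; decide

theorem pvInner_append_other (pairs : List (String × String)) (cl gr c : String)
    (h : ∀ g ∈ pvGRADES, (cl, gr) ≠ (c, g)) :
    pvInner (pairs ++ [(cl, gr)]) c = pvInner pairs c := by
  apply PySem.Dict.ext
  simp only [pvInner, pvItems_mk]
  apply List.map_congr_left
  intro g hgm
  have hcount : (pairs ++ [(cl, gr)]).count (c, g) = pairs.count (c, g) := by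
    rw [List.count_append]
    simp [h g hgm]
  rw [hcount]

theorem pvInner_append_self (pairs : List (String × String)) (cl gr : String)
    (hg : gr ∈ pvGRADES) :
    (pvInner pairs cl).insert gr ((pvInner pairs cl).getD gr 0 + 1)
      = pvInner (pairs ++ [(cl, gr)]) cl := by
  rw [pvGetD_inner pairs cl gr hg]
  apply PySem.Dict.ext
  rw [PySem.Dict.items_insert_of_contains _ _
    (by rw [PySem.Dict.contains_iff_mem_keys, pvKeys_inner]; exact hg)]
  simp only [pvInner, pvItems_mk, List.map_map]
  apply List.map_congr_left
  intro g hgm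
  simp only [Function.comp]
  by_cases hggr : g = gr
  · subst hggr
    rw [if_pos (by simp)]
    rw [List.count_append]
    simp
  · rw [if_neg (by simp [hggr])]
    refine Prod.ext rfl ?_
    show (pairs.count (cl, g) : Int) = ((pairs ++ [(cl, gr)]).count (cl, g) : Int)
    rw [List.count_append]
    have hz : List.count ((cl, g) : String × String) [(cl, gr)] = 0 :=
      List.count_eq_zero.2 (by simp [Prod.ext_iff, hggr])
    rw [hz]; simp

theorem pvBuild2_append_other (S : List String) (pairs : List (String × String))
    (cl gr : String) (h : cl ∉ S) :
    pvBuild2 S (pairs ++ [(cl, gr)]) = pvBuild2 S pairs := by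
  simp only [pvBuild2]
  apply List.map_congr_left
  intro c hcS
  refine Prod.ext rfl ?_
  show pvInner (pairs ++ [(cl, gr)]) c = pvInner pairs c
  apply pvInner_append_other
  intro g _ hh
  have hcc : cl = c := congrArg Prod.fst hh
  exact h (hcc ▸ hcS)

theorem pvBuild2_append_invalid (S : List String) (pairs : List (String × String))
    (cl gr : String) (hg : gr ∉ pvGRADES) :
    pvBuild2 S (pairs ++ [(cl, gr)]) = pvBuild2 S pairs := by
  simp only [pvBuild2]
  apply List.map_congr_left
  intro c _
  refine Prod.ext rfl ?_
  apply pvInner_append_other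
  intro g hgm hh
  have hgg : gr = g := congrArg Prod.snd hh
  exact hg (hgg ▸ hgm)

theorem pvPhase2 (S : List String) (pairs : List (String × String)) (cl gr : String)
    (hS : S.Nodup) (hcl : cl ∈ S) :
    (if ((PySem.Dict.mk (pvBuild2 S pairs)).getD cl PySem.Dict.empty).contains gr then
       (PySem.Dict.mk (pvBuild2 S pairs)).insert cl
         (((PySem.Dict.mk (pvBuild2 S pairs)).getD cl PySem.Dict.empty).insert gr
           (((PySem.Dict.mk (pvBuild2 S pairs)).getD cl PySem.Dict.empty).getD gr 0 + 1))
     else (PySem.Dict.mk (pvBuild2 S pairs)))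
    = PySem.Dict.mk (pvBuild2 S (pairs ++ [(cl, gr)])) := by
  rw [pvGetD_build2 S pairs cl hS hcl, pvContains_inner]
  by_cases hg : gr ∈ pvGRADES
  · rw [if_pos (by simp [hg])]
    apply PySem.Dict.ext
    rw [PySem.Dict.items_insert_of_contains _ _
      (by rw [PySem.Dict.contains_iff_mem_keys, pvKeys_build2]; exact hcl)]
    simp only [pvBuild2, List.map_map]
    apply List.map_congr_left
    intro c hcS
    simp only [Function.comp]
    by_cases hcc : c = cl
    · subst hcc
      rw [if_pos (by simp)]
      refine Prod.ext rfl ?_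
      show (pvInner pairs c).insert gr ((pvInner pairs c).getD gr 0 + 1)
          = pvInner (pairs ++ [(c, gr)]) c
      rw [pvGetD_inner pairs c gr hg]
      apply PySem.Dict.ext
      rw [PySem.Dict.items_insert_of_contains _ _
        (by rw [PySem.Dict.contains_iff_mem_keys, pvKeys_inner]; exact hg)]
      simp only [pvInner, pvItems_mk, List.map_map]
      apply List.map_congr_left
      intro g hgm
      simp only [Function.comp]
      by_cases hggr : g = gr
      · subst hggr
        rw [if_pos (by simp)]
        rw [List.count_append]
        simp
      · rw [if_neg (by simp [hggr])]
        refine Prod.ext rfl ?_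
        show (pairs.count (c, g) : Int) = ((pairs ++ [(c, gr)]).count (c, g) : Int)
        rw [List.count_append]
        have hz : List.count ((c, g) : String × String) [(c, gr)] = 0 :=
          List.count_eq_zero.2 (by simp [Prod.ext_iff, hggr])
        rw [hz]; simp
    · rw [if_neg (by simp [hcc])]
      refine Prod.ext rfl ?_
      show pvInner pairs c = pvInner (pairs ++ [(cl, gr)]) c
      exact (pvInner_append_other pairs cl gr c
        (by intro g _ h; exact hcc (by cases h; rfl))).symm
  · rw [if_neg (by simp [hg])]
    apply PySem.Dict.ext
    simp only [pvBuild2]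
    apply List.map_congr_left
    intro c _
    refine Prod.ext rfl ?_
    show pvInner pairs c = pvInner (pairs ++ [(cl, gr)]) c
    refine (pvInner_append_other pairs cl gr c ?_).symm
    intro g hgm h
    exact hg (by cases h; exact hgm)

theorem pvGetD_last (B : List (String × PySem.Dict String Int)) (cl : String)
    (v : PySem.Dict String Int) (hnd : (B.map Prod.fst).Nodup) (hcl : cl ∉ B.map Prod.fst) :
    (PySem.Dict.mk (B ++ [(cl, v)])).getD cl PySem.Dict.empty = v := by
  apply PySem.Dict.getD_of_mem_items
  · exact List.mem_append.2 (Or.inr (List.mem_singleton.2 rfl))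
  · rw [PySem.Dict.keys_mk, List.map_append]
    refine List.Nodup.append hnd (List.nodup_singleton _) ?_
    intro a ha hb
    simp only [List.map_cons, List.map_nil, List.mem_singleton] at hb
    exact hcl (hb ▸ ha)

theorem pvInsert_last (B : List (String × PySem.Dict String Int)) (cl : String)
    (v w : PySem.Dict String Int) (hcl : cl ∉ B.map Prod.fst) :
    (PySem.Dict.mk (B ++ [(cl, v)])).insert cl w = PySem.Dict.mk (B ++ [(cl, w)]) := by
  apply PySem.Dict.ext
  rw [PySem.Dict.items_insert_of_contains _ _
    (by rw [PySem.Dict.contains_iff_mem_keys, PySem.Dict.keys_mk, List.map_append]; simp)]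
  simp only [List.map_append]
  congr 1
  · conv_rhs => rw [← List.map_id B]
    apply List.map_congr_left
    intro q hq
    have hne : q.1 ≠ cl := fun h => hcl (h ▸ List.mem_map.2 ⟨q, hq, rfl⟩)
    simp [hne]
  · simp

theorem pvInner_of_fresh (pairs : List (String × String)) (cl : String)
    (hclp : cl ∉ pairs.map Prod.fst) :
    pvInner pairs cl
      = PySem.Dict.mk [("A", (0 : Int)), ("B", 0), ("C", 0), ("D", 0), ("E", 0), ("S", 0), ("U", 0)] := by
  have hz : ∀ g : String, pairs.count (cl, g) = 0 := fun g =>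
    List.count_eq_zero.2 (fun hmem => hclp (List.mem_map.2 ⟨(cl, g), hmem, rfl⟩))
  apply PySem.Dict.ext
  simp only [pvInner, pvItems_mk, pvGRADES, List.map_cons, List.map_nil, hz]
  rfl

theorem pvStep_build (pairs : List (String × String)) (s : List (String × String)) :
    analyze_grades_step (PySem.Dict.mk (pvBuild pairs)) s
      = PySem.Dict.mk (pvBuild (pairs ++ [(pyGetKey s "class", pyGetKey s "grade")])) := by
  have hS : (PySem.Set.ofList (pairs.map Prod.fst)).Nodup := PySem.Set.nodup_ofList _
  simp only [analyze_grades_step, pvBuild]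
  set cl := pyGetKey s "class"
  set gr := pyGetKey s "grade"
  by_cases hc : cl ∈ pairs.map Prod.fst
  · have hcont : (PySem.Dict.mk (pvBuild2 (PySem.Set.ofList (pairs.map Prod.fst)) pairs)).contains cl = true := by
      rw [PySem.Dict.contains_iff_mem_keys, pvKeys_build2]
      exact (PySem.Set.mem_ofList _ _).2 hc
    rw [if_pos hcont]
    have hS2 : PySem.Set.ofList ((pairs ++ [(cl, gr)]).map Prod.fst)
        = PySem.Set.ofList (pairs.map Prod.fst) := by
      rw [List.map_append]
      show PySem.Set.ofList (pairs.map Prod.fst ++ [cl]) = _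
      rw [PySem.Set.ofList_append_singleton]
      exact PySem.Set.add_of_mem ((PySem.Set.mem_ofList _ _).2 hc)
    rw [hS2]
    exact pvPhase2 _ pairs cl gr hS ((PySem.Set.mem_ofList _ _).2 hc)
  · have hclS : cl ∉ PySem.Set.ofList (pairs.map Prod.fst) :=
      fun hm => hc ((PySem.Set.mem_ofList _ _).1 hm)
    have hcf : ¬ ((PySem.Dict.mk (pvBuild2 (PySem.Set.ofList (pairs.map Prod.fst)) pairs)).contains cl = true) := by
      rw [PySem.Dict.contains_iff_mem_keys, pvKeys_build2]
      exact hclS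
    rw [if_neg hcf]
    -- collapse the template-initialisation chain
    have hmapS : (pvBuild2 (PySem.Set.ofList (pairs.map Prod.fst)) pairs).map Prod.fst
        = PySem.Set.ofList (pairs.map Prod.fst) := by
      simpa [PySem.Dict.keys_mk] using pvKeys_build2 (PySem.Set.ofList (pairs.map Prod.fst)) pairs
    have hclB : cl ∉ (pvBuild2 (PySem.Set.ofList (pairs.map Prod.fst)) pairs).map Prod.fst := by
      rw [hmapS]; exact hclS
    have hndB : ((pvBuild2 (PySem.Set.ofList (pairs.map Prod.fst)) pairs).map Prod.fst).Nodup := by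
      rw [hmapS]; exact hS
    have h0 : (PySem.Dict.mk (pvBuild2 (PySem.Set.ofList (pairs.map Prod.fst)) pairs)).insert cl PySem.Dict.empty
        = PySem.Dict.mk (pvBuild2 (PySem.Set.ofList (pairs.map Prod.fst)) pairs ++ [(cl, PySem.Dict.empty)]) := by
      apply PySem.Dict.ext
      rw [PySem.Dict.items_insert_of_not_contains]
      simp only [Bool.not_eq_true] at hcf
      exact hcf
    simp only [h0, pvGetD_last _ _ _ hndB hclB, pvInsert_last _ _ _ _ hclB]
    have hT : ((((((PySem.Dict.empty.insert "A" (0 : Int)).insert "B" 0).insert "C" 0).insert "D" 0).insert "E" 0).insert "S" 0).insert "U" 0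
        = pvInner pairs cl := by
      rw [pvInner_of_fresh pairs cl hc]
      decide
    rw [hT]
    have hB2 : pvBuild2 (PySem.Set.ofList (pairs.map Prod.fst)) pairs ++ [(cl, pvInner pairs cl)]
        = pvBuild2 (PySem.Set.ofList (pairs.map Prod.fst) ++ [cl]) pairs := by
      simp [pvBuild2, List.map_append]
    rw [hB2]
    have hS' : (PySem.Set.ofList (pairs.map Prod.fst) ++ [cl]).Nodup := by
      refine List.Nodup.append hS (List.nodup_singleton _) ?_
      intro a ha hb
      rw [List.mem_singleton] at hb
      exact hclS (hb ▸ ha)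
    have hS2 : PySem.Set.ofList ((pairs ++ [(cl, gr)]).map Prod.fst)
        = PySem.Set.ofList (pairs.map Prod.fst) ++ [cl] := by
      rw [List.map_append]
      show PySem.Set.ofList (pairs.map Prod.fst ++ [cl]) = _
      rw [PySem.Set.ofList_append_singleton]
      exact PySem.Set.add_of_not_mem hclS
    rw [hS2, pvContains_inner]
    by_cases hg : gr ∈ pvGRADES
    · rw [if_pos (by simp [hg])]
      apply PySem.Dict.ext
      show _ ++ _ = _
      rw [pvInner_append_self pairs cl gr hg]
      rw [show pvBuild2 (PySem.Set.ofList (pairs.map Prod.fst) ++ [cl]) (pairs ++ [(cl, gr)])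
            = pvBuild2 (PySem.Set.ofList (pairs.map Prod.fst)) (pairs ++ [(cl, gr)])
                ++ [(cl, pvInner (pairs ++ [(cl, gr)]) cl)] from by
          simp [pvBuild2, List.map_append]]
      rw [pvBuild2_append_other _ pairs cl gr hclS]
    · rw [if_neg (by simp [hg])]
      apply PySem.Dict.ext
      exact congrArg PySem.Dict.items
        (congrArg PySem.Dict.mk (pvBuild2_append_invalid _ pairs cl gr hg).symm)

theorem pvFold_build (sd : List (List (String × String))) :
    sd.foldl analyze_grades_step PySem.Dict.empty
      = PySem.Dict.mk (pvBuild (sd.map (fun s => (pyGetKey s "class", pyGetKey s "grade")))) := by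
  induction sd using List.reverseRecOn with
  | nil => rfl
  | append_singleton sd s ih =>
      rw [List.foldl_append, List.foldl_cons, List.foldl_nil, ih, pvStep_build, List.map_append]
      simp

-- ===== VERDICT (by name: the statement is the Claim_ definition above) =====
theorem analyze_grades_spec : Claim_equal_analyze_grades := by
  unfold Claim_equal_analyze_grades
  intro sd _ _
  unfold Spec_analyze_grades analyze_grades analyze_grades_alt
  rw [pvFold_build]
  simp only [PySem.List.dedup_eq_ofList]
  simp only [pvBuild, pvBuild2, List.map_map]
  apply List.map_congr_left
  intro c hcS
  simp only [Function.comp]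
  refine Prod.ext rfl ?_
  show (pvInner (sd.map (fun s => (pyGetKey s "class", pyGetKey s "grade"))) c).items
      = pvGRADES.map (fun g => (g,
          ((sd.map (fun s => (pyGetKey s "class", pyGetKey s "grade"))).foldl
            (fun d key => d.insert key (d.getD key 0 + 1)) PySem.Dict.empty).getD (c, g) 0))
  simp only [pvInner, pvItems_mk]
  apply List.map_congr_left
  intro g _
  refine Prod.ext rfl ?_
  show ((sd.map (fun s => (pyGetKey s "class", pyGetKey s "grade"))).count (c, g) : Int)
      = ((sd.map (fun s => (pyGetKey s "class", pyGetKey s "grade"))).foldl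
          (fun d key => d.insert key (d.getD key 0 + 1)) PySem.Dict.empty).getD (c, g) 0
  rw [PySem.Dict.getD_foldl_insert_add_one]
  simp
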